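-- pv_equiv track=rewrite | github.com/jorgegarcia197/CTCI-Python | AlgoExpert/stacks/next_greater.py | nextGreaterElement_2
-- ===== SOURCE A (Python) =====
-- def nextGreaterElement_2(array):
--     stack = []
--     output = [-1] * len(array)
--     for idx in range(2*len(array)):
--         circular_idx = idx % len(array)
--         while stack and array[stack[-1]] < array[circular_idx]:
--             output[stack.pop()] = array[circular_idx]
--         stack.append(circular_idx)
--     return output
-- ===== SOURCE B (Python) =====
-- def nextGreaterElement_2(array):
--     n = len(array)
--     output = []
--     for i in range(n):
--         nxt = -1
--         for offset in range(1, n):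
--             j = (i + offset) % n
--             if array[j] > array[i]:
--                 nxt = array[j]
--                 break
--         output.append(nxt)
--     return output
-- ===== Notes on version B (the rewrite author's own statement) =====
-- stated objective: alternative
-- what changed: Replaces the monotonic-stack sweep over 2n circular indices by a direct brute-force scan: for each index i look at the n-1 following circular positions and take the first strictly greater value.
import Mathlib
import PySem

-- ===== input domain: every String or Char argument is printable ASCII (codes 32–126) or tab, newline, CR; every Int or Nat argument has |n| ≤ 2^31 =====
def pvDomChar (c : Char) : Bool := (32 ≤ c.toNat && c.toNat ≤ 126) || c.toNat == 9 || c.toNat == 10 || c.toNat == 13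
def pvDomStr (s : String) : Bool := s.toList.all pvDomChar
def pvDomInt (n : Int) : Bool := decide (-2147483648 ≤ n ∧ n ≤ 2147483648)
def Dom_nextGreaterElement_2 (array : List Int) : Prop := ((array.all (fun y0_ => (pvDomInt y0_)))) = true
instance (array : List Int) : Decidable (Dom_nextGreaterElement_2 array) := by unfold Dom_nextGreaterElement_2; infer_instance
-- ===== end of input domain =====

-- B replaces A's monotonic-stack sweep over 2n circular indices by a direct brute-force
-- scan of the n-1 following circular positions for each index (objective: alternative).

-- ===== PORT A =====
-- The Python stack grows at the right end (append/pop/stack[-1]); we keep it head-as-top,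
-- so append = cons, stack[-1] = head, pop = tail — the same stack, reversed representation.
-- Indices held in the stack and `circular_idx` are always in range [0, len), so
-- `array[...]` / `output[...] = v` are ported exactly by pyGetD / pySetD.
-- The inner `while` loop becomes structural recursion on the stack it consumes.
def ngePop (array : List Int) (vc : Int) : List Int → List Int → List Int × List Int
  | [], output => ([], output)
  | s :: rest, output =>
    if PySem.List.pyGetD array s 0 < vc then
      ngePop array vc rest (PySem.List.pySetD output s vc)
    else (s :: rest, output)

def ngeStep (array : List Int) (st : List Int × List Int) (idx : Int) : List Int × List Int :=
  let c := PySem.Int.mod idx (array.length : Int)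
  let vc := PySem.List.pyGetD array c 0
  let r := ngePop array vc st.1 st.2
  (c :: r.1, r.2)

def nextGreaterElement_2 (array : List Int) : List Int :=
  ((PySem.List.pyRange 0 (2 * (array.length : Int)) 1).foldl (ngeStep array)
    ([], List.replicate array.length (-1))).2

-- ===== PORT B =====
-- `for offset in range(1, n)` with `break` becomes structural recursion over the offset
-- list; offsets and `i`, `j` are nonnegative and `j, i < n`, so Nat `%` and `getD` are exact.
def scanGreater (array : List Int) (n : Nat) (i : Nat) : List Nat → Int
  | [] => -1
  | offset :: rest =>
    let j := (i + offset) % n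
    if array.getD i 0 < array.getD j 0 then array.getD j 0
    else scanGreater array n i rest

def nextGreaterElement_2_alt (array : List Int) : List Int :=
  let n := array.length
  (List.range n).map (fun i => scanGreater array n i ((List.range (n - 1)).map (· + 1)))

-- ===== PRECONDITION & SPEC =====
def Spec_nextGreaterElement_2 (array : List Int) (out : List Int) : Prop := out = nextGreaterElement_2_alt array
instance (array : List Int) (out : List Int) : Decidable (Spec_nextGreaterElement_2 array out) := by unfold Spec_nextGreaterElement_2; infer_instance

-- ===== CLAIM (what is proved, stated in full; the proofs are below) =====
def Claim_equal_nextGreaterElement_2 : Prop := ∀ (array : List Int), Dom_nextGreaterElement_2 array → Spec_nextGreaterElement_2 array (nextGreaterElement_2 array)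

-- ===== LEMMAS AND PROOFS =====

-- value at circular position p (n-periodic view of the array)
def vAt (array : List Int) (p : Nat) : Int := array.getD (p % array.length) 0

-- position p is still unresolved at time t: pushed before t, nothing later beats it
def Unres (array : List Int) (t p : Nat) : Prop :=
  p < t ∧ ∀ q, p < q → q < t → vAt array q ≤ vAt array p

-- what output[i] holds after t steps of A: value of the first position q < t after i
-- that strictly beats i, else -1
def prd (array : List Int) (i q : Nat) : Bool :=
  decide (i < q) && decide (vAt array i < vAt array q)

def charOut (array : List Int) (t i : Nat) : Int :=
  match (List.range t).find? (prd array i) with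
  | some q => vAt array q
  | none => -1

structure StInv (array : List Int) (t : Nat) (gs : List Nat) (o : List Int) : Prop where
  len : o.length = array.length
  sorted : gs.Pairwise (· > ·)
  mem : ∀ p, p ∈ gs ↔ Unres array t p
  out : ∀ i, i < array.length → o.getD i 0 = charOut array t i

def gstep (array : List Int) (t : Nat) (gs : List Nat) (o : List Int) : List Nat × List Int :=
  let w := vAt array t
  (t :: gs.dropWhile (fun p => decide (vAt array p < w)),
   (gs.takeWhile (fun p => decide (vAt array p < w))).foldl
     (fun acc p => acc.set (p % array.length) w) o)

def ghost (array : List Int) : Nat → List Nat × List Int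
  | 0 => ([], List.replicate array.length (-1))
  | t + 1 => gstep array t (ghost array t).1 (ghost array t).2

theorem getD_set_self (o : List Int) (j : Nat) (w : Int) (h : j < o.length) :
    (o.set j w).getD j 0 = w := by
  simp [List.getD_eq_getElem?_getD, h]

theorem getD_set_ne (o : List Int) (i j : Nat) (w : Int) (h : j ≠ i) :
    (o.set j w).getD i 0 = o.getD i 0 := by
  simp [List.getD_eq_getElem?_getD, h]

theorem foldl_set_length (n' : Nat) (w : Int) :
    ∀ (l : List Nat) (o : List Int),
      (l.foldl (fun acc p => acc.set (p % n') w) o).length = o.length := by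
  intro l
  induction l with
  | nil => intro o; rfl
  | cons p rest ih => intro o; rw [List.foldl_cons, ih, List.length_set]

theorem foldl_set_getD (n' : Nat) (w : Int) :
    ∀ (l : List Nat) (o : List Int) (i : Nat), i < o.length →
      (l.foldl (fun acc p => acc.set (p % n') w) o).getD i 0
        = if l.any (fun p => p % n' == i) then w else o.getD i 0 := by
  intro l
  induction l with
  | nil => intro o i _; simp
  | cons p rest ih =>
    intro o i hi
    rw [List.foldl_cons, ih _ i (by rwa [List.length_set])]
    by_cases hp : p % n' = i
    · have hb : (p % n' == i) = true := by simpa using hp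
      simp only [List.any_cons, hb, Bool.true_or, if_true]
      split_ifs with h2
      · rfl
      · rw [hp]; exact getD_set_self o i w hi
    · have hb : (p % n' == i) = false := by simpa using hp
      simp only [List.any_cons, hb, Bool.false_or]
      split_ifs with h2
      · rfl
      · exact getD_set_ne o i (p % n') w hp

theorem range_find?_some_facts (t : Nat) (pr : Nat → Bool) (q : Nat)
    (h : (List.range t).find? pr = some q) :
    q < t ∧ pr q = true ∧ ∀ r, r < q → pr r = false := by
  induction t with
  | zero => simp [List.range_zero] at h
  | succ t ih =>
    rw [List.range_succ, List.find?_append] at h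
    rcases h' : (List.range t).find? pr with _ | k
    · rw [h', Option.none_or] at h
      have hnone : ∀ r, r < t → pr r = false := by
        rw [List.find?_eq_none] at h'
        intro r hr
        simpa using h' r (by simpa [List.mem_range] using hr)
      rcases h'' : pr t with _ | _
      · rw [List.find?_cons, h''] at h
        simp at h
      · rw [List.find?_cons, h''] at h
        simp only [Option.some.injEq] at h
        subst h
        exact ⟨by omega, h'', fun r hr => hnone r hr⟩
    · rw [h', Option.some_or] at h
      obtain rfl : k = q := by simpa using h
      obtain ⟨h1, h2, h3⟩ := ih h'
      exact ⟨by omega, h2, h3⟩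

-- the value that pops a second-pass copy of i equals the value of the first position
-- after i that strictly beats i (n-periodicity of vAt)
theorem pop_value (array : List Int) (i p t q0 : Nat)
    (hi : i < array.length)
    (hq0a : i < q0) (hq0v : vAt array i < vAt array q0)
    (hmin : ∀ r, i < r → r < q0 → ¬ vAt array i < vAt array r) :
    ∀ (hpi : p % array.length = i) (hip : i < p)
      (hupp : ∀ q, p < q → q < t → vAt array q ≤ vAt array i)
      (hpt : p < t) (htp : t ≤ p + array.length)
      (hvt : vAt array i < vAt array t) (hq0b : q0 < t),
    vAt array q0 = vAt array t := by
  induction p using Nat.strong_induction_on generalizing t with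
  | _ p ih =>
  intro hpi hip hupp hpt htp hvt hq0b
  have hpn : array.length ≤ p := by
    by_contra hc
    push Not at hc
    rw [Nat.mod_eq_of_lt hc] at hpi
    omega
  have hpni : (p - array.length) % array.length = i := by
    rw [← Nat.mod_eq_sub_mod hpn]; exact hpi
  have hpn2 : i ≤ p - array.length := by
    rcases Nat.lt_or_ge (p - array.length) array.length with h2 | h2
    · rw [Nat.mod_eq_of_lt h2] at hpni; omega
    · omega
  have htn : array.length ≤ t := by omega
  have hvy : vAt array (t - array.length) = vAt array t := by
    unfold vAt
    rw [← Nat.mod_eq_sub_mod htn]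
  have hiy : i < t - array.length := by omega
  have hq0y : q0 ≤ t - array.length := by
    by_contra hc
    push Not at hc
    exact hmin (t - array.length) hiy hc (by rw [hvy]; exact hvt)
  have hshift : ∀ q, p - array.length < q → q < t - array.length → vAt array q ≤ vAt array i := by
    intro q h1 h2
    have hq : vAt array q = vAt array (q + array.length) := by
      unfold vAt; rw [Nat.add_mod_right]
    rw [hq]
    exact hupp (q + array.length) (by omega) (by omega)
  rcases Nat.eq_or_lt_of_le hq0y with heq | hlt
  · rw [heq]; exact hvy
  · have hq0pn : q0 ≤ p - array.length := by
      by_contra hc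
      push Not at hc
      exact absurd (hshift q0 hc hlt) (not_le.mpr hq0v)
    have hipn : i < p - array.length := by omega
    have := ih (p - array.length) (by omega) (t - array.length) hpni hipn hshift
      (by omega) (by omega) (by rw [hvy]; exact hvt) hlt
    rw [this, hvy]

theorem dropWhile_ge (array : List Int) (w : Int) :
    ∀ gs : List Nat, gs.Pairwise (fun a b => vAt array a ≤ vAt array b) →
      ∀ p ∈ gs.dropWhile (fun p => decide (vAt array p < w)), w ≤ vAt array p := by
  intro gs
  induction gs with
  | nil => simp
  | cons a rest ih =>
    intro hp p hmem
    rw [List.dropWhile_cons] at hmem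
    by_cases ha : vAt array a < w
    · simp only [ha, decide_true, if_true] at hmem
      exact ih hp.of_cons p hmem
    · simp only [ha, decide_false] at hmem
      rcases List.mem_cons.mp hmem with rfl | hmem'
      · exact not_lt.mp ha
      · exact le_trans (not_lt.mp ha) ((List.pairwise_cons.mp hp).1 p hmem')

theorem gstep_inv (array : List Int) (t : Nat) (gs : List Nat) (o : List Int)
    (h : StInv array t gs o) :
    StInv array (t + 1) (gstep array t gs o).1 (gstep array t gs o).2 := by
  have hmemlt : ∀ p ∈ gs, p < t := fun p hp => ((h.mem p).1 hp).1
  have hF1 : gs.Pairwise (fun a b => vAt array a ≤ vAt array b) :=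
    h.sorted.imp_of_mem (fun {a b} ha hb hab => ((h.mem b).1 hb).2 a hab (hmemlt a ha))
  have hg1 : (gstep array t gs o).1
      = t :: gs.dropWhile (fun p => decide (vAt array p < vAt array t)) := rfl
  have hg2 : (gstep array t gs o).2
      = (gs.takeWhile (fun p => decide (vAt array p < vAt array t))).foldl
          (fun acc p => acc.set (p % array.length) (vAt array t)) o := rfl
  have hkeptle := dropWhile_ge array (vAt array t) gs hF1
  have hkept_iff : ∀ p, p ∈ gs.dropWhile (fun p => decide (vAt array p < vAt array t))
      ↔ p ∈ gs ∧ vAt array t ≤ vAt array p := by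
    intro p
    constructor
    · intro hp
      exact ⟨(List.dropWhile_sublist _).mem hp, hkeptle p hp⟩
    · rintro ⟨hp, hge⟩
      have hsplit : p ∈ gs.takeWhile (fun p => decide (vAt array p < vAt array t))
            ++ gs.dropWhile (fun p => decide (vAt array p < vAt array t)) := by
        rw [List.takeWhile_append_dropWhile]; exact hp
      rcases List.mem_append.mp hsplit with h1 | h2
      · have := List.mem_takeWhile_imp h1
        simp only [decide_eq_true_eq] at this
        exact absurd this (not_lt.mpr hge)
      · exact h2
  have hpop_iff : ∀ p, p ∈ gs.takeWhile (fun p => decide (vAt array p < vAt array t))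
      ↔ p ∈ gs ∧ vAt array p < vAt array t := by
    intro p
    constructor
    · intro hp
      have := List.mem_takeWhile_imp hp
      simp only [decide_eq_true_eq] at this
      exact ⟨(List.takeWhile_sublist _).mem hp, this⟩
    · rintro ⟨hp, hlt⟩
      have hsplit : p ∈ gs.takeWhile (fun p => decide (vAt array p < vAt array t))
            ++ gs.dropWhile (fun p => decide (vAt array p < vAt array t)) := by
        rw [List.takeWhile_append_dropWhile]; exact hp
      rcases List.mem_append.mp hsplit with h1 | h2
      · exact h1
      · exact absurd (hkeptle p h2) (not_le.mpr hlt)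
  constructor
  · -- length
    rw [hg2, foldl_set_length, h.len]
  · -- sorted
    rw [hg1]
    refine List.pairwise_cons.mpr ⟨fun p hp => hmemlt p ((hkept_iff p).1 hp).1, ?_⟩
    exact List.Pairwise.sublist (List.dropWhile_sublist _) h.sorted
  · -- membership
    intro p
    rw [hg1, List.mem_cons]
    constructor
    · rintro (rfl | hp)
      · exact ⟨by omega, fun q hq1 hq2 => by omega⟩
      · obtain ⟨hpg, hge⟩ := (hkept_iff p).1 hp
        obtain ⟨hplt, hspec⟩ := (h.mem p).1 hpg
        refine ⟨by omega, fun q hq1 hq2 => ?_⟩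
        rcases Nat.lt_or_ge q t with h1 | h1
        · exact hspec q hq1 h1
        · have hq : q = t := by omega
          subst hq
          exact hge
    · intro hu
      by_cases hpt : p = t
      · exact Or.inl hpt
      · right
        obtain ⟨hplt1, hspec⟩ := hu
        have hplt : p < t := by omega
        have hmem : p ∈ gs := (h.mem p).2 ⟨hplt, fun q hq1 hq2 => hspec q hq1 (by omega)⟩
        exact (hkept_iff p).2 ⟨hmem, hspec t hplt (by omega)⟩
  · -- output
    intro i hi
    have hio : i < o.length := by rw [h.len]; exact hi
    rw [hg2, foldl_set_getD array.length (vAt array t) _ o i hio]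
    have hvp_eq : ∀ p, p % array.length = i → vAt array p = vAt array i := by
      intro p hp
      unfold vAt
      rw [hp, Nat.mod_eq_of_lt hi]
    rcases hf : (List.range t).find? (prd array i) with _ | q0
    · have hold : o.getD i 0 = -1 := by
        have := h.out i hi
        unfold charOut at this
        rw [hf] at this
        exact this
      have hnew : charOut array (t + 1) i = if prd array i t then vAt array t else -1 := by
        unfold charOut
        rw [List.range_succ, List.find?_append, hf, Option.none_or]
        cases hpt : prd array i t
        · simp [hpt]
        · simp [hpt]
      rw [hnew]
      rw [List.find?_eq_none] at hf
      have hnone : ∀ q, i < q → q < t → vAt array q ≤ vAt array i := by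
        intro q h1 h2
        have := hf q (by simpa [List.mem_range] using h2)
        simp only [prd, Bool.and_eq_true, decide_eq_true_eq, not_and] at this
        exact not_lt.mp (this h1)
      cases hpt : prd array i t
      · -- predicate false at t: nothing popped writes to i
        have hany : (gs.takeWhile (fun p => decide (vAt array p < vAt array t))).any
            (fun p => p % array.length == i) = false := by
          by_contra hc
          rw [Bool.not_eq_false, List.any_eq_true] at hc
          obtain ⟨p, hp, hpi⟩ := hc
          obtain ⟨hpg, hplt_w⟩ := (hpop_iff p).1 hp
          have hpi' : p % array.length = i := by simpa using hpi
          have hvpi : vAt array p = vAt array i := hvp_eq p hpi'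
          have hplt : p < t := hmemlt p hpg
          have hip : i ≤ p := by
            rcases Nat.lt_or_ge p array.length with h1 | h1
            · rw [Nat.mod_eq_of_lt h1] at hpi'; omega
            · omega
          have : prd array i t = true := by
            simp only [prd, Bool.and_eq_true, decide_eq_true_eq]
            exact ⟨by omega, by rw [← hvpi]; exact hplt_w⟩
          rw [hpt] at this
          cases this
        rw [hany]
        simpa using hold
      · -- predicate true at t: i itself is popped, output[i] becomes vAt t
        simp only [prd, Bool.and_eq_true, decide_eq_true_eq] at hpt
        have himem : i ∈ gs := (h.mem i).2 ⟨hpt.1, hnone⟩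
        have hany : (gs.takeWhile (fun p => decide (vAt array p < vAt array t))).any
            (fun p => p % array.length == i) = true := by
          rw [List.any_eq_true]
          exact ⟨i, (hpop_iff i).2 ⟨himem, hpt.2⟩, by simp [Nat.mod_eq_of_lt hi]⟩
        rw [hany]
        simp
    · have hold : o.getD i 0 = vAt array q0 := by
        have := h.out i hi
        unfold charOut at this
        rw [hf] at this
        exact this
      have hnew : charOut array (t + 1) i = vAt array q0 := by
        unfold charOut
        rw [List.range_succ, List.find?_append, hf, Option.some_or]
      rw [hnew]
      obtain ⟨hq0t, hq0p, hq0min⟩ := range_find?_some_facts t _ q0 hf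
      have hq0 : i < q0 ∧ vAt array i < vAt array q0 := by
        simpa [prd] using hq0p
      by_cases hany : (gs.takeWhile (fun p => decide (vAt array p < vAt array t))).any
          (fun p => p % array.length == i) = true
      · obtain ⟨p, hp, hpi⟩ := List.any_eq_true.mp hany
        obtain ⟨hpg, hpw⟩ := (hpop_iff p).1 hp
        have hpi' : p % array.length = i := by simpa using hpi
        have hvpi : vAt array p = vAt array i := hvp_eq p hpi'
        obtain ⟨hplt, hspec⟩ := (h.mem p).1 hpg
        have hvti : vAt array i < vAt array t := by rw [← hvpi]; exact hpw
        have hpne : p ≠ i := by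
          intro he
          have := hspec q0 (by omega) hq0t
          rw [hvpi] at this
          exact absurd this (not_le.mpr hq0.2)
        have hip : i < p := by
          rcases Nat.lt_or_ge p array.length with h1 | h1
          · rw [Nat.mod_eq_of_lt h1] at hpi'; omega
          · omega
        have hupp : ∀ q, p < q → q < t → vAt array q ≤ vAt array i := by
          intro q h1 h2
          rw [← hvpi]
          exact hspec q h1 h2
        have htp : t ≤ p + array.length := by
          by_contra hcon
          push Not at hcon
          have h1 : vAt array (t - array.length) = vAt array t := by
            unfold vAt
            rw [← Nat.mod_eq_sub_mod (by omega)]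
          have h2 := hupp (t - array.length) (by omega) (by omega)
          rw [h1] at h2
          exact absurd h2 (not_le.mpr hvti)
        have hmin : ∀ r, i < r → r < q0 → ¬ vAt array i < vAt array r := by
          intro r h1 h2 hc
          have := hq0min r h2
          simp [prd, h1, hc] at this
        have hkey := pop_value array i p t q0 hi hq0.1 hq0.2 hmin hpi' hip hupp hplt htp hvti hq0t
        rw [hany]
        simp only [if_true]
        exact hkey.symm
      · rw [Bool.not_eq_true] at hany
        rw [hany]
        simpa using hold

theorem ghost_inv (array : List Int) (t : Nat) :
    StInv array t (ghost array t).1 (ghost array t).2 := by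
  induction t with
  | zero =>
    constructor
    · simp [ghost]
    · simp [ghost]
    · intro p; simp [ghost, Unres]
    · intro i hi; simp [ghost, charOut, hi]
  | succ t ih => exact gstep_inv array t _ _ ih

theorem ngePop_map (array : List Int) (w : Int) :
    ∀ (gs : List Nat) (o : List Int),
      ngePop array w (gs.map (fun p => ((p % array.length : Nat) : Int))) o
      = ((gs.dropWhile (fun p => decide (vAt array p < w))).map
            (fun p => ((p % array.length : Nat) : Int)),
         (gs.takeWhile (fun p => decide (vAt array p < w))).foldl
            (fun acc p => acc.set (p % array.length) w) o) := by
  intro gs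
  induction gs with
  | nil => intro o; rfl
  | cons p rest ih =>
    intro o
    simp only [List.map_cons, ngePop, List.dropWhile_cons, List.takeWhile_cons]
    rw [PySem.List.pyGetD_natCast]
    by_cases hc : vAt array p < w
    · have : array.getD ((p % array.length : Nat)) 0 < w := hc
      rw [if_pos this, if_pos (by simpa using hc)]
      simp only [hc, decide_true]
      rw [PySem.List.pySetD_natCast]
      exact ih _
    · have : ¬ array.getD ((p % array.length : Nat)) 0 < w := hc
      rw [if_neg this, if_neg (by simpa using hc)]
      simp [hc]

theorem real_eq_ghost (array : List Int) (t : Nat) :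
    (List.range t).foldl (fun st (k : Nat) => ngeStep array st ((0 : Int) + k))
      ([], List.replicate array.length (-1))
    = ((ghost array t).1.map (fun p => ((p % array.length : Nat) : Int)), (ghost array t).2) := by
  induction t with
  | zero => rfl
  | succ t ih =>
    rw [List.range_succ, List.foldl_append, ih]
    simp only [List.foldl_cons, List.foldl_nil]
    show ngeStep array _ ((0 : Int) + t) = _
    unfold ngeStep
    have hc : PySem.Int.mod ((0 : Int) + t) (array.length : Int) = ((t % array.length : Nat) : Int) := by
      rw [zero_add]
      exact_mod_cast PySem.Int.mod_natCast t array.length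
    simp only [hc, PySem.List.pyGetD_natCast]
    have hv : array.getD ((t % array.length : Nat)) 0 = vAt array t := rfl
    rw [hv, ngePop_map]
    simp [ghost, gstep]

theorem range_find?_none (t : Nat) (p : Nat → Bool) (h : ∀ q, q < t → p q = false) :
    (List.range t).find? p = none := by
  rw [List.find?_eq_none]
  intro x hx
  simp only [List.mem_range] at hx
  simp [h x hx]

theorem range_find?_mono (m m' : Nat) (h : m ≤ m') (p : Nat → Bool) (k : Nat)
    (hk : (List.range m).find? p = some k) : (List.range m').find? p = some k := by
  have : m' = m + (m' - m) := by omega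
  rw [this, List.range_add, List.find?_append, hk]
  rfl

-- if every hit at or beyond m has a hit below m with the same g-value, extending the
-- scanned range beyond m does not change the "value of the first hit"
theorem find_range_extend (m m' : Nat) (hmm : m ≤ m') (p : Nat → Bool) (g : Nat → Int)
    (hper : ∀ k, m ≤ k → k < m' → p k = true → ∃ k', k' < m ∧ p k' = true ∧ g k' = g k) :
    (match (List.range m').find? p with | some k => g k | none => -1)
    = (match (List.range m).find? p with | some k => g k | none => -1) := by
  rcases h : (List.range m).find? p with _ | k
  · have hnone : ∀ q, q < m → p q = false := by
      rw [List.find?_eq_none] at h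
      intro q hq
      simpa using h q (by simpa [List.mem_range] using hq)
    have h' : (List.range m').find? p = none := by
      apply range_find?_none
      intro q hq
      by_cases hqm : q < m
      · exact hnone q hqm
      · by_contra hpq
        obtain ⟨k', hk1, hk2, _⟩ := hper q (by omega) hq (by simpa using hpq)
        rw [hnone k' hk1] at hk2; exact absurd hk2 (by simp)
    rw [h']
  · rw [range_find?_mono m m' hmm p k h]

-- B's inner scan as a find? over the offset list
theorem scanGreater_eq_find (array : List Int) (n i : Nat) (os : List Nat) :
    scanGreater array n i os
      = (match os.find? (fun o => decide (array.getD i 0 < array.getD ((i + o) % n) 0)) with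
         | some o => array.getD ((i + o) % n) 0
         | none => -1) := by
  induction os with
  | nil => rfl
  | cons o rest ih =>
    have hs : scanGreater array n i (o :: rest)
        = if array.getD i 0 < array.getD ((i + o) % n) 0 then array.getD ((i + o) % n) 0
          else scanGreater array n i rest := rfl
    rw [hs]
    cases hd : decide (array.getD i 0 < array.getD ((i + o) % n) 0) with
    | false =>
      rw [if_neg (of_decide_eq_false hd), ih]
      simp only [List.find?_cons, hd]
    | true =>
      rw [if_pos (of_decide_eq_true hd)]
      simp only [List.find?_cons, hd]

theorem match_map (opt : Option Nat) (f : Nat → Nat) (g : Nat → Int) :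
    (match opt.map f with | some q => g q | none => -1)
      = (match opt with | some k => g (f k) | none => -1) := by
  cases opt <;> rfl

theorem charOut_eq_scan (array : List Int) (i : Nat) (hi : i < array.length) :
    charOut array (2 * array.length) i
      = scanGreater array array.length i ((List.range (array.length - 1)).map (· + 1)) := by
  set n := array.length with hn
  have hsplit : (2 : Nat) * n = (i + 1) + (2 * n - i - 1) := by omega
  have hvi : array.getD i 0 = vAt array i := by
    unfold vAt; rw [← hn, Nat.mod_eq_of_lt hi]
  rw [scanGreater_eq_find, List.find?_map]
  unfold charOut prd
  rw [hsplit, List.range_add, List.find?_append]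
  have h1 : (List.range (i + 1)).find?
      (fun q => decide (i < q) && decide (vAt array i < vAt array q)) = none := by
    apply range_find?_none
    intro q hq
    simp [show ¬ i < q by omega]
  rw [h1, Option.none_or, List.find?_map]
  have hpred : ((fun q => decide (i < q) && decide (vAt array i < vAt array q)) ∘ (fun x => i + 1 + x))
      = (fun k => decide (vAt array i < vAt array (i + 1 + k))) := by
    funext k
    simp [show i < i + 1 + k by omega]
  have hg : ∀ k, array.getD ((i + (k + 1)) % n) 0 = vAt array (i + 1 + k) := by
    intro k
    rw [show i + (k + 1) = i + 1 + k by omega]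
    unfold vAt; rw [← hn]
  have hpred2 : ((fun o => decide (array.getD i 0 < array.getD ((i + o) % n) 0)) ∘ (fun x => x + 1))
      = (fun k => decide (vAt array i < vAt array (i + 1 + k))) := by
    funext k
    simp only [Function.comp_apply, hvi, hg k]
  rw [hpred, hpred2]
  have key := find_range_extend (n - 1) (2 * n - i - 1) (by omega)
      (fun k => decide (vAt array i < vAt array (i + 1 + k))) (fun k => vAt array (i + 1 + k))
      (by
        intro k hk1 hk2 hpk
        simp only [decide_eq_true_eq] at hpk
        have hq1 : n ≤ i + 1 + k := by omega
        have hq2 : i + 1 + k < 2 * n := by omega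
        have hvper : vAt array (i + 1 + k) = vAt array (i + 1 + k - n) := by
          unfold vAt
          rw [← hn, Nat.mod_eq_sub_mod hq1]
        have hne : i + 1 + k - n ≠ i := by
          intro he
          rw [hvper, he, ← hvi, hvi] at hpk
          exact lt_irrefl _ hpk
        have hge : i + 1 ≤ i + 1 + k - n := by omega
        refine ⟨i + 1 + k - n - i - 1, by omega, ?_, ?_⟩
        · simp only [decide_eq_true_eq]
          rw [show i + 1 + (i + 1 + k - n - i - 1) = i + 1 + k - n by omega, ← hvper]
          exact hpk
        · simp only
          rw [show i + 1 + (i + 1 + k - n - i - 1) = i + 1 + k - n by omega, ← hvper])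
  rw [match_map _ _ (vAt array), match_map, key]
  rcases (List.range (n - 1)).find? (fun k => decide (vAt array i < vAt array (i + 1 + k))) with _ | k
  · rfl
  · exact (hg k).symm

-- ===== VERDICT (by name: the statement is the Claim_ definition above) =====
theorem nextGreaterElement_2_spec : Claim_equal_nextGreaterElement_2 := by
  intro array _
  unfold Spec_nextGreaterElement_2
  rcases Nat.eq_zero_or_pos array.length with h0 | hn
  · rw [List.length_eq_zero_iff] at h0
    subst h0; rfl
  · have hout := (ghost_inv array (2 * array.length)).out
    have hlen := (ghost_inv array (2 * array.length)).len
    have hreal : nextGreaterElement_2 array = (ghost array (2 * array.length)).2 := by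
      unfold nextGreaterElement_2
      rw [PySem.List.pyRange_one, List.foldl_map]
      have : ((2 * (array.length : Int) - 0).toNat) = 2 * array.length := by omega
      rw [this, real_eq_ghost array]
    rw [hreal]
    unfold nextGreaterElement_2_alt
    apply List.ext_getElem
    · simp [hlen]
    · intro i h1 h2
      have hi : i < array.length := by simpa [hlen] using h1
      have := hout i hi
      rw [List.getD_eq_getElem _ _ h1] at this
      simp only [List.getElem_map, List.getElem_range]
      rw [this, charOut_eq_scan array i hi]
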